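-- pv_equiv track=rewrite | github.com/papanokechi/wallis-pcf-lean4 | _add_sections_v5.py | fix_source
-- ===== SOURCE A (Python) =====
-- def fix_source(lines):
--     result = []
--     for i, line in enumerate(lines):
--         if i < len(lines) - 1:
--             result.append(line + '\n' if not line.endswith('\n') else line)
--         else:
--             result.append(line.rstrip('\n'))
--     return result
-- ===== SOURCE B (Python) =====
-- def fix_source(lines):
--     out = []
--     rev = reversed(lines)
--     for last in rev:            # runs at most once: peel off the final line
--         out.append(last.rstrip('\n'))
--         break
--     for line in rev:            # remaining lines, in back-to-front order
--         out.append(line if line.endswith('\n') else line + '\n')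
--     out.reverse()
--     return out
-- ===== Notes on version B (the rewrite author's own statement) =====
-- stated objective: alternative
-- what changed: Replaces A's forward indexed loop with an i<len-1 positional branch by a back-to-front build: iterate reversed(lines), peel off the final line structurally and rstrip it, ensure-newline the remaining lines in reverse order, then reverse the accumulator; no indices or length comparisons.
import Mathlib
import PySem

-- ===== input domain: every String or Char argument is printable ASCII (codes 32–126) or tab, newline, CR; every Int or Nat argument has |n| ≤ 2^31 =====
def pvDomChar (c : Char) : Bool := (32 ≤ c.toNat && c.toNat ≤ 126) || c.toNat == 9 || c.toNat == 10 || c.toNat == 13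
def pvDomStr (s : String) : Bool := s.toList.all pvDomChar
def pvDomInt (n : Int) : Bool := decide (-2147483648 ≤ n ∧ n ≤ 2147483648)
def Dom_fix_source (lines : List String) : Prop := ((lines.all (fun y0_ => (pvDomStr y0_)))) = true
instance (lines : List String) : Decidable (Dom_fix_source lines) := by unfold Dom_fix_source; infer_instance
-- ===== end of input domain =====

-- B replaces A's forward indexed loop by a back-to-front build over reversed(lines):
-- peel off the final line structurally, rstrip it, ensure-newline the rest, reverse; objective: alternative.

-- s.rstrip('\n'): drop all trailing '\n' characters (hand port, exact: rstrip with an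
-- explicit chars argument removes exactly the trailing characters in that set)
def rstripNl (s : String) : String :=
  String.ofList ((s.toList.reverse.dropWhile (fun c => c == '\n')).reverse)

-- ===== PORT A =====
def fix_source (lines : List String) : List String :=
  (PySem.List.enumerate lines 0).foldl
    (fun result p =>
      if p.1 < (lines.length : Int) - 1 then
        result ++ [if PySem.Str.endswith p.2 "\n" = false then p.2 ++ "\n" else p.2]
      else
        result ++ [rstripNl p.2]) []

-- ===== PORT B =====
def fix_source_alt (lines : List String) : List String :=
  -- reversed(lines); the first loop peels at most one element (the final line)
  match lines.reverse with
  | [] => []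
  | last :: rest =>
    -- out after both append loops, then out.reverse()
    (rstripNl last
      :: rest.map (fun line => if PySem.Str.endswith line "\n" = true then line else line ++ "\n")).reverse

-- ===== PRECONDITION & SPEC =====
def Spec_fix_source (lines : List String) (out : List String) : Prop := out = fix_source_alt lines
instance (lines : List String) (out : List String) : Decidable (Spec_fix_source lines out) := by unfold Spec_fix_source; infer_instance

-- ===== CLAIM (what is proved, stated in full; the proofs are below) =====
def Claim_equal_fix_source : Prop := ∀ (lines : List String), Dom_fix_source lines → Spec_fix_source lines (fix_source lines)

-- ===== LEMMAS AND PROOFS =====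

-- A's per-element value, as a function of the index pair
def pvBody (n : Int) (p : Int × String) : String :=
  if p.1 < n - 1 then
    (if PySem.Str.endswith p.2 "\n" = false then p.2 ++ "\n" else p.2)
  else rstripNl p.2

lemma fix_source_eq_map (lines : List String) :
    fix_source lines = (PySem.List.enumerate lines 0).map (pvBody lines.length) := by
  unfold fix_source
  have hfun : (fun (result : List String) (p : Int × String) =>
      if p.1 < (lines.length : Int) - 1 then
        result ++ [if PySem.Str.endswith p.2 "\n" = false then p.2 ++ "\n" else p.2]
      else result ++ [rstripNl p.2])
      = fun result p => result ++ [pvBody lines.length p] := by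
    funext result p
    unfold pvBody
    split <;> rfl
  rw [hfun, PySem.List.foldl_append_singleton_eq_map, List.nil_append]

-- on the initial segment (all indices < n-1) A's body is B's ensure-newline function
lemma map_body_init (init : List String) (n : Int) (h : (init.length : Int) < n) :
    (PySem.List.enumerate init 0).map (pvBody n)
      = init.map (fun l => if PySem.Str.endswith l "\n" = true then l else l ++ "\n") := by
  have h2 : init.map (fun l => if PySem.Str.endswith l "\n" = true then l else l ++ "\n")
      = (PySem.List.enumerate init 0).map
          (fun p => if PySem.Str.endswith p.2 "\n" = true then p.2 else p.2 ++ "\n") := by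
    conv_lhs => rw [← PySem.List.map_snd_enumerate init 0]
    rw [List.map_map]
    rfl
  rw [h2]
  apply List.map_congr_left
  intro p hp
  rcases (PySem.List.mem_enumerate_iff init 0 p).mp hp with ⟨k, hk, rfl⟩
  have hlt : (0 : Int) + (k : Int) < n - 1 := by
    have : (k : Int) < (init.length : Int) := by exact_mod_cast hk
    omega
  unfold pvBody
  simp only [hlt, if_pos]
  cases hE : PySem.Str.endswith init[k] "\n" <;> simp

-- B's back-to-front build computes "ensure-newline on all but the last, rstrip the last"
lemma alt_char (a : String) (l : List String) :
    fix_source_alt (a :: l)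
      = (a :: l).dropLast.map (fun s => if PySem.Str.endswith s "\n" = true then s else s ++ "\n")
          ++ [rstripNl ((a :: l).getLast (by simp))] := by
  have hne : (a :: l) ≠ ([] : List String) := by simp
  have hrev : (a :: l).reverse
      = (a :: l).getLast hne :: (a :: l).dropLast.reverse := by
    conv_lhs => rw [(List.dropLast_append_getLast hne).symm]
    rw [List.reverse_append]
    rfl
  unfold fix_source_alt
  rw [hrev]
  simp

lemma main_eq : ∀ (lines : List String), fix_source lines = fix_source_alt lines
  | [] => rfl
  | a :: l => by
    have hne : (a :: l) ≠ ([] : List String) := by simp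
    rw [fix_source_eq_map]
    have hdl : (a :: l).dropLast.length = (a :: l).length - 1 := by simp
    have henum : PySem.List.enumerate (a :: l) 0
        = PySem.List.enumerate (a :: l).dropLast 0
          ++ PySem.List.enumerate [(a :: l).getLast hne] (0 + ((a :: l).dropLast.length : Int)) := by
      conv_lhs => rw [(List.dropLast_append_getLast hne).symm]
      rw [PySem.List.enumerate_append]
    have hinit : (PySem.List.enumerate (a :: l).dropLast 0).map (pvBody (a :: l).length)
        = (a :: l).dropLast.map (fun s => if PySem.Str.endswith s "\n" = true then s else s ++ "\n") := by
      refine map_body_init _ _ ?_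
      rw [hdl]
      have h1 : 1 ≤ (a :: l).length := by simp
      omega
    have hc : ¬ ((0 : Int) + ((a :: l).dropLast.length : Int) < ((a :: l).length : Int) - 1) := by
      omega
    have hlast : (PySem.List.enumerate [(a :: l).getLast hne] (0 + ((a :: l).dropLast.length : Int))).map
          (pvBody (a :: l).length) = [rstripNl ((a :: l).getLast hne)] := by
      rw [show PySem.List.enumerate [(a :: l).getLast hne] (0 + ((a :: l).dropLast.length : Int))
            = [(0 + ((a :: l).dropLast.length : Int), (a :: l).getLast hne)] from by
        simp [PySem.List.enumerate_cons, PySem.List.enumerate_nil]]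
      simp only [List.map]
      unfold pvBody
      rw [if_neg hc]
    rw [henum, List.map_append, hinit, hlast, alt_char a l]

-- ===== VERDICT (by name: the statement is the Claim_ definition above) =====
theorem fix_source_spec : Claim_equal_fix_source := by
  intro lines _
  unfold Spec_fix_source
  exact main_eq lines
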